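-- pv_equiv track=rewrite | github.com/tiangong-ai/skills | eco-council-normalize/scripts/eco_council_normalize.py | semantic_fingerprint
-- ===== SOURCE A (Python) =====
-- STOPWORDS = {
--     "a",
--     "an",
--     "and",
--     "are",
--     "as",
--     "at",
--     "be",
--     "but",
--     "by",
--     "for",
--     "from",
--     "has",
--     "have",
--     "in",
--     "into",
--     "is",
--     "it",
--     "its",
--     "of",
--     "on",
--     "or",
--     "that",
--     "the",
--     "their",
--     "this",
--     "to",
--     "was",
--     "were",
--     "with",
-- }
--
-- def semantic_fingerprint(text: str) -> str:
--     cleaned = []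
--     token = []
--     for char in text.lower():
--         if char.isalnum():
--             token.append(char)
--             continue
--         if token:
--             cleaned.append("".join(token))
--             token = []
--     if token:
--         cleaned.append("".join(token))
--     filtered = [item for item in cleaned if item and item not in STOPWORDS]
--     return "-".join(filtered[:12])
-- ===== SOURCE B (Python) =====
-- STOPWORDS = {
--     "a", "an", "and", "are", "as", "at", "be", "but", "by", "for", "from",
--     "has", "have", "in", "into", "is", "it", "its", "of", "on", "or",
--     "that", "the", "their", "this", "to", "was", "were", "with",
-- }
--
-- def semantic_fingerprint(text: str) -> str:
--     # Two-pointer scan over maximal alphanumeric runs, stopping as soon as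
--     # 12 kept words have been found (A collects every token first).
--     s = text.lower()
--     n = len(s)
--     parts = []
--     i = 0
--     while i < n and len(parts) < 12:
--         if not s[i].isalnum():
--             i += 1
--             continue
--         j = i
--         while j < n and s[j].isalnum():
--             j += 1
--         w = s[i:j]
--         if w not in STOPWORDS:
--             parts.append(w)
--         i = j
--     return "-".join(parts)
-- ===== Notes on version B (the rewrite author's own statement) =====
-- stated objective: alternative
-- what changed: Replaces A's char-by-char accumulator that collects every token before filtering and slicing with a two-pointer scan over maximal alphanumeric runs (takeWhile/dropWhile) that filters stopwords on the fly and stops scanning as soon as 12 words are kept.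
import Mathlib
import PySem

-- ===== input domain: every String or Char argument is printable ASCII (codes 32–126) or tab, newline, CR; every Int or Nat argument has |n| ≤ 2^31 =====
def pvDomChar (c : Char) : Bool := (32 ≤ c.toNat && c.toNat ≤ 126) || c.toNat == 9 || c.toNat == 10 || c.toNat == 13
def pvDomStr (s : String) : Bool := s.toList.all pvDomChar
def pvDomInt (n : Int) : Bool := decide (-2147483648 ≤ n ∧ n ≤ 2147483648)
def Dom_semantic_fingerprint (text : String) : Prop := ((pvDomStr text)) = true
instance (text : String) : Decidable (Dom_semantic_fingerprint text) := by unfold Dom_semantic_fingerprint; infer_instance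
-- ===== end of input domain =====

-- B replaces A's char-accumulator pass (collect all tokens, then filter, then slice 12)
-- by a two-pointer scan over maximal alphanumeric runs that stops after 12 kept words (objective: alternative).

-- module-level constant STOPWORDS shared by both programs (a Python set of words; membership test only)
def STOPWORDS : List (List Char) :=
  [['a'],
   ['a', 'n'],
   ['a', 'n', 'd'],
   ['a', 'r', 'e'],
   ['a', 's'],
   ['a', 't'],
   ['b', 'e'],
   ['b', 'u', 't'],
   ['b', 'y'],
   ['f', 'o', 'r'],
   ['f', 'r', 'o', 'm'],
   ['h', 'a', 's'],
   ['h', 'a', 'v', 'e'],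
   ['i', 'n'],
   ['i', 'n', 't', 'o'],
   ['i', 's'],
   ['i', 't'],
   ['i', 't', 's'],
   ['o', 'f'],
   ['o', 'n'],
   ['o', 'r'],
   ['t', 'h', 'a', 't'],
   ['t', 'h', 'e'],
   ['t', 'h', 'e', 'i', 'r'],
   ['t', 'h', 'i', 's'],
   ['t', 'o'],
   ['w', 'a', 's'],
   ['w', 'e', 'r', 'e'],
   ['w', 'i', 't', 'h']]

-- ===== PORT A =====
-- A's loop body: append alnum chars to the current token, flush the token on a non-alnum char
def sfA_step (st : List (List Char) × List Char) (c : Char) : List (List Char) × List Char :=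
  if PySem.Chars.isalnum c then (st.1, st.2 ++ [c])
  else if st.2 ≠ [] then (st.1 ++ [st.2], []) else st

def semantic_fingerprint (text : String) : String :=
  let st := (PySem.Chars.lower text.toList).foldl sfA_step ([], [])
  let cleaned := if st.2 ≠ [] then st.1 ++ [st.2] else st.1
  let filtered := cleaned.filter (fun item => !item.isEmpty && !(STOPWORDS.contains item))
  String.ofList (PySem.Chars.join ['-'] (filtered.take 12))

-- ===== PORT B =====
-- B's outer while loop; k = 12 - len(parts) is the room left in parts.
-- The inner `while j < n and s[j].isalnum(): j += 1` plus the slice s[i:j]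
-- is exactly takeWhile/dropWhile of the maximal alphanumeric run at i.
def sfB_loop (cs : List Char) (k : Nat) : List (List Char) :=
  match k, cs with
  | 0, _ => []
  | _ + 1, [] => []
  | k + 1, c :: cs =>
    if PySem.Chars.isalnum c then
      let w := c :: cs.takeWhile PySem.Chars.isalnum
      let rest := cs.dropWhile PySem.Chars.isalnum
      if STOPWORDS.contains w then sfB_loop rest (k + 1)
      else w :: sfB_loop rest k
    else sfB_loop cs (k + 1)
termination_by cs.length
decreasing_by
  · have := List.length_dropWhile_le (p := PySem.Chars.isalnum) cs
    simp only [List.length_cons]; omega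
  · have := List.length_dropWhile_le (p := PySem.Chars.isalnum) cs
    simp only [List.length_cons]; omega
  · simp

def semantic_fingerprint_alt (text : String) : String :=
  String.ofList (PySem.Chars.join ['-'] (sfB_loop (PySem.Chars.lower text.toList) 12))

-- ===== PRECONDITION & SPEC =====
def Spec_semantic_fingerprint (text : String) (out : String) : Prop := out = semantic_fingerprint_alt text
instance (text : String) (out : String) : Decidable (Spec_semantic_fingerprint text out) := by unfold Spec_semantic_fingerprint; infer_instance

-- ===== CLAIM (what is proved, stated in full; the proofs are below) =====
def Claim_equal_semantic_fingerprint : Prop := ∀ (text : String), Dom_semantic_fingerprint text → Spec_semantic_fingerprint text (semantic_fingerprint text)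

-- ===== LEMMAS AND PROOFS =====

-- proof-side list of all maximal alphanumeric runs of cs
def sfToks (cs : List Char) : List (List Char) :=
  match cs with
  | [] => []
  | c :: cs =>
    if PySem.Chars.isalnum c then
      (c :: cs.takeWhile PySem.Chars.isalnum) :: sfToks (cs.dropWhile PySem.Chars.isalnum)
    else sfToks cs
termination_by cs.length
decreasing_by
  · have := List.length_dropWhile_le (p := PySem.Chars.isalnum) cs
    simp only [List.length_cons]; omega
  · simp

-- A's fold, flushed, started with pending token tok
def sfFlushFold (tok : List Char) (cs : List Char) : List (List Char) :=
  let st := cs.foldl sfA_step ([], tok)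
  if st.2 ≠ [] then st.1 ++ [st.2] else st.1

-- sfA_step only ever appends to the cleaned list
theorem sfA_fold_prefix : ∀ (cs : List Char) (cleaned : List (List Char)) (tok : List Char),
    cs.foldl sfA_step (cleaned, tok)
      = (cleaned ++ (cs.foldl sfA_step ([], tok)).1, (cs.foldl sfA_step ([], tok)).2) := by
  intro cs
  induction cs with
  | nil => intro cleaned tok; simp
  | cons c rest ih =>
    intro cleaned tok
    simp only [List.foldl_cons, sfA_step]
    by_cases h1 : PySem.Chars.isalnum c = true
    · simpa [h1] using ih cleaned (tok ++ [c])
    · by_cases h2 : tok = []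
      · simpa [h1, h2] using ih cleaned []
      · simp only [h1, h2, ne_eq, not_false_eq_true, if_true, Bool.false_eq_true, if_false,
          List.nil_append]
        rw [ih (cleaned ++ [tok]) [], ih [tok] []]
        simp

-- A's flushed fold computes exactly the maximal-run tokens (generalized over the pending token)
theorem sfFlushFold_toks : ∀ (cs : List Char),
    sfFlushFold [] cs = sfToks cs ∧
    ∀ tok, tok ≠ [] →
      sfFlushFold tok cs
        = (tok ++ cs.takeWhile PySem.Chars.isalnum) :: sfToks (cs.dropWhile PySem.Chars.isalnum) := by
  intro cs
  induction cs with
  | nil =>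
    constructor
    · simp [sfFlushFold, sfToks]
    · intro tok ht; simp [sfFlushFold, sfToks, ht]
  | cons c rest ih =>
    by_cases h : PySem.Chars.isalnum c = true
    · have step : ∀ tok, sfFlushFold tok (c :: rest) = sfFlushFold (tok ++ [c]) rest := by
        intro tok; simp [sfFlushFold, sfA_step, h]
      constructor
      · rw [show sfFlushFold [] (c :: rest) = sfFlushFold [c] rest from step []]
        rw [ih.2 [c] (by simp)]
        simp [sfToks, h]
      · intro tok ht
        rw [step tok, ih.2 (tok ++ [c]) (by simp)]
        simp [List.dropWhile_cons, h]
    · have hb : PySem.Chars.isalnum c = false := by simpa using h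
      constructor
      · have : sfFlushFold [] (c :: rest) = sfFlushFold [] rest := by
          simp [sfFlushFold, sfA_step, hb]
        rw [this, ih.1]; simp [sfToks, hb]
      · intro tok ht
        have e1 : sfA_step ([], tok) c = ([tok], []) := by
          simp [sfA_step, hb, ht]
        have : sfFlushFold tok (c :: rest)
            = tok :: (rest.foldl sfA_step ([], [])).1
              ++ (if (rest.foldl sfA_step ([], [])).2 ≠ [] then [(rest.foldl sfA_step ([], [])).2] else []) := by
          simp only [sfFlushFold, List.foldl_cons, e1]
          rw [sfA_fold_prefix rest [tok] []]
          split_ifs <;> simp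
        rw [this]
        have h1 := ih.1
        simp only [sfFlushFold] at h1
        simp [List.dropWhile_cons, hb, sfToks]
        split_ifs at h1 ⊢ <;> simp_all

-- every maximal run is nonempty
theorem sfToks_ne_nil : ∀ (cs : List Char), ∀ t ∈ sfToks cs, t ≠ [] := by
  intro cs
  induction cs using sfToks.induct with
  | case1 => simp [sfToks]
  | case2 c cs h ih =>
    intro t ht
    simp only [sfToks, if_pos h, List.mem_cons] at ht
    rcases ht with h1 | h1
    · subst h1; simp
    · exact ih t h1
  | case3 c cs h ih =>
    intro t ht
    simp only [sfToks, if_neg h] at ht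
    exact ih t ht

-- B's bounded loop is take k of the filtered token list
theorem sfB_loop_eq : ∀ (cs : List Char) (k : Nat),
    sfB_loop cs k = ((sfToks cs).filter (fun w => !STOPWORDS.contains w)).take k := by
  intro cs
  induction cs using sfToks.induct with
  | case1 => intro k; cases k <;> simp [sfB_loop, sfToks]
  | case2 c cs h ih =>
    intro k
    cases k with
    | zero => simp [sfB_loop]
    | succ k =>
      simp only [sfB_loop, if_pos h, sfToks, List.filter_cons, ih]
      by_cases hs : (c :: cs.takeWhile PySem.Chars.isalnum) ∈ STOPWORDS <;>
        simp [hs, List.take_succ_cons]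
  | case3 c cs h ih =>
    intro k
    cases k with
    | zero => simp [sfB_loop]
    | succ k => simp only [sfB_loop, if_neg h, sfToks]; rw [ih]

-- ===== VERDICT (by name: the statement is the Claim_ definition above) =====
theorem semantic_fingerprint_spec : Claim_equal_semantic_fingerprint := by
  intro text _
  unfold Spec_semantic_fingerprint semantic_fingerprint_alt
  have hA : semantic_fingerprint text
      = String.ofList (PySem.Chars.join ['-']
          (((sfFlushFold [] (PySem.Chars.lower text.toList)).filter
            (fun item => !item.isEmpty && !(STOPWORDS.contains item))).take 12)) := rfl
  rw [hA, (sfFlushFold_toks (PySem.Chars.lower text.toList)).1,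
      sfB_loop_eq (PySem.Chars.lower text.toList) 12]
  congr 1
  refine congrArg _ (congrArg _ (List.filter_congr ?_))
  intro t ht
  have hne : t ≠ [] := sfToks_ne_nil _ t ht
  simp [hne]
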